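-- pv_equiv track=rewrite | github.com/IAI-USTC-Quantum/UnifiedQuantum | uniqc/calibration/xeb/patterns.py | _build_conflict_graph_from_pairs
-- ===== SOURCE A (Python) =====
-- def _build_conflict_graph_from_pairs(
--     pairs: list[tuple[int, int]],
-- ) -> tuple[dict[int, set[int]], list[tuple[int, int]]]:
--     """Build conflict graph from a list of 2-qubit gate pairs.
--
--     Vertices = gates (ordered pairs). Two gates conflict if they share a qubit.
--     """
--     n = len(pairs)
--     conflict_adj: dict[int, set[int]] = {i: set() for i in range(n)}
--
--     for i, (u1, v1) in enumerate(pairs):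
--         for j in range(i + 1, n):
--             u2, v2 = pairs[j]
--             if {u1, v1} & {u2, v2}:
--                 conflict_adj[i].add(j)
--                 conflict_adj[j].add(i)
--
--     return conflict_adj, pairs
-- ===== SOURCE B (Python) =====
-- def _merge_excluding(a, b, x):
--     """Merge two strictly increasing lists into one strictly increasing list,
--     dropping duplicates and the value x."""
--     out = []
--     p, q = 0, 0
--     while p < len(a) and q < len(b):
--         if a[p] == b[q]:
--             if a[p] != x:
--                 out.append(a[p])
--             p += 1
--             q += 1
--         elif a[p] < b[q]:
--             if a[p] != x:
--                 out.append(a[p])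
--             p += 1
--         else:
--             if b[q] != x:
--                 out.append(b[q])
--             q += 1
--     while p < len(a):
--         if a[p] != x:
--             out.append(a[p])
--         p += 1
--     while q < len(b):
--         if b[q] != x:
--             out.append(b[q])
--         q += 1
--     return out
--
--
-- def _build_conflict_graph_from_pairs(
--     pairs: list[tuple[int, int]],
-- ) -> tuple[dict[int, set[int]], list[tuple[int, int]]]:
--     """Build conflict graph from a list of 2-qubit gate pairs.
--
--     Index qubit -> gate list once, then each gate's conflict set is the merge
--     of the (sorted) gate lists of its two qubits.
--     """
--     qubit_to_gates: dict[int, list[int]] = {}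
--     for i, (u, v) in enumerate(pairs):
--         qubit_to_gates.setdefault(u, []).append(i)
--         if v != u:
--             qubit_to_gates.setdefault(v, []).append(i)
--
--     conflict_adj: dict[int, set[int]] = {}
--     for i, (u, v) in enumerate(pairs):
--         gu = qubit_to_gates.get(u, [])
--         gv = qubit_to_gates.get(v, []) if v != u else []
--         conflict_adj[i] = set(_merge_excluding(gu, gv, i))
--
--     return conflict_adj, pairs
-- ===== Notes on version B (the rewrite author's own statement) =====
-- stated objective: faster
-- what changed: Replaces the all-pairs O(n^2) double loop over gates with a qubit->gate index built in one pass; each gate's conflict set is then the merge of the two (sorted) gate lists of its qubits, so cost is O(n + sum of per-qubit list work) instead of comparing every pair of gates.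
import Mathlib
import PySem

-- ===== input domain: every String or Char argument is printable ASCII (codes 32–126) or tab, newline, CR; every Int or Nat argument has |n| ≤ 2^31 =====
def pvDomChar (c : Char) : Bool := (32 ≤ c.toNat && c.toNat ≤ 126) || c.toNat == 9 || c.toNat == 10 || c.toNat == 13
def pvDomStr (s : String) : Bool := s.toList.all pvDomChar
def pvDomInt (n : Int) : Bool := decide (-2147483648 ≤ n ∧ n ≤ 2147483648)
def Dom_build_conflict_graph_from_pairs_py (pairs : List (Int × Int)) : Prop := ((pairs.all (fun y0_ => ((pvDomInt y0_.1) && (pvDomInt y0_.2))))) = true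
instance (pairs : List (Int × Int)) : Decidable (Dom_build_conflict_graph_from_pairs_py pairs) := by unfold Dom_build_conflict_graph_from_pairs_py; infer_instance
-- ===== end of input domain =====

-- B replaces A's all-pairs double loop by a qubit->gate index; each gate's conflict set is the
-- merge of the two sorted per-qubit gate lists (objective: faster, asymptotically on sparse graphs).

-- ===== PORT A =====
-- inner-loop body of A: `if {u1,v1} & {u2,v2}: conflict_adj[i].add(j); conflict_adj[j].add(i)`
def aStep (pairs : List (Int × Int)) (u1 v1 i : Int)
    (d : PySem.Dict Int (PySem.Set Int)) (j : Int) : PySem.Dict Int (PySem.Set Int) :=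
  let q := PySem.List.pyGetD pairs j (0, 0)
  if PySem.Set.inter (PySem.Set.ofList [u1, v1]) (PySem.Set.ofList [q.1, q.2]) ≠ [] then
    (d.modify i PySem.Set.empty (fun s => PySem.Set.add s j)).modify j
      PySem.Set.empty (fun s => PySem.Set.add s i)
  else d

def build_conflict_graph_from_pairs_py (pairs : List (Int × Int)) :
    (List (Int × List Int)) × (List (Int × Int)) :=
  let n : Int := pairs.length
  let d0 : PySem.Dict Int (PySem.Set Int) :=
    (PySem.List.pyRange 0 n 1).foldl (fun d i => d.insert i PySem.Set.empty) PySem.Dict.empty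
  let d :=
    (PySem.List.enumerate pairs).foldl
      (fun d p => (PySem.List.pyRange (p.1 + 1) n 1).foldl (aStep pairs p.2.1 p.2.2 p.1) d) d0
  (d.items, pairs)

-- ===== PORT B =====
-- two-pointer merge of two sorted lists, dropping duplicates and the value x (_merge_excluding)
def mergeEx (a b : List Int) (x : Int) : List Int :=
  match a, b with
  | [], [] => []
  | [], q :: qs => if q = x then mergeEx [] qs x else q :: mergeEx [] qs x
  | p :: ps, [] => if p = x then mergeEx ps [] x else p :: mergeEx ps [] x
  | p :: ps, q :: qs =>
    if p = q then (if p = x then mergeEx ps qs x else p :: mergeEx ps qs x)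
    else if p < q then (if p = x then mergeEx ps (q :: qs) x else p :: mergeEx ps (q :: qs) x)
    else (if q = x then mergeEx (p :: ps) qs x else q :: mergeEx (p :: ps) qs x)
termination_by a.length + b.length

def build_conflict_graph_from_pairs_py_alt (pairs : List (Int × Int)) :
    (List (Int × List Int)) × (List (Int × Int)) :=
  let q2g : PySem.Dict Int (List Int) :=
    (PySem.List.enumerate pairs).foldl
      (fun d p =>
        let d' := d.insert p.2.1 (d.getD p.2.1 [] ++ [p.1])
        if p.2.2 ≠ p.2.1 then d'.insert p.2.2 (d'.getD p.2.2 [] ++ [p.1]) else d')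
      PySem.Dict.empty
  let adj : PySem.Dict Int (PySem.Set Int) :=
    (PySem.List.enumerate pairs).foldl
      (fun d p =>
        let gu := q2g.getD p.2.1 []
        let gv := if p.2.2 ≠ p.2.1 then q2g.getD p.2.2 [] else []
        d.insert p.1 (PySem.Set.ofList (mergeEx gu gv p.1)))
      PySem.Dict.empty
  (adj.items, pairs)

-- ===== PRECONDITION & SPEC =====
def Spec_build_conflict_graph_from_pairs_py (pairs : List (Int × Int)) (out : (List (Int × List Int)) × (List (Int × Int))) : Prop := out = build_conflict_graph_from_pairs_py_alt pairs
instance (pairs : List (Int × Int)) (out : (List (Int × List Int)) × (List (Int × Int))) : Decidable (Spec_build_conflict_graph_from_pairs_py pairs out) := by unfold Spec_build_conflict_graph_from_pairs_py; infer_instance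

-- ===== CLAIM (what is proved, stated in full; the proofs are below) =====
def Claim_equal_build_conflict_graph_from_pairs_py : Prop := ∀ (pairs : List (Int × Int)), Dom_build_conflict_graph_from_pairs_py pairs → Spec_build_conflict_graph_from_pairs_py pairs (build_conflict_graph_from_pairs_py pairs)

-- ===== LEMMAS AND PROOFS =====

-- `pairs[j]` for an in-range index
def pget (pairs : List (Int × Int)) (j : Nat) : Int × Int := pairs.getD j (0, 0)

-- gate j uses qubit q
def hasQ (pairs : List (Int × Int)) (j : Nat) (q : Int) : Bool :=
  ((pget pairs j).1 == q) || ((pget pairs j).2 == q)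

-- gates j and k share a qubit
def share (pairs : List (Int × Int)) (j k : Nat) : Bool :=
  hasQ pairs j (pget pairs k).1 || hasQ pairs j (pget pairs k).2

-- adjacency row of k after A has processed all ordered index pairs lexicographically below (i, t)
def condT (pairs : List (Int × Int)) (i t k j : Nat) : Bool :=
  decide (j ≠ k) && share pairs j k &&
    (decide (min j k < i) || (decide (min j k = i) && decide (max j k < t)))

def rowA (pairs : List (Int × Int)) (i t k : Nat) : List Int :=
  ((List.range pairs.length).filter (condT pairs i t k)).map Int.ofNat

-- the final adjacency row of k
def rowF (pairs : List (Int × Int)) (k : Nat) : List Int :=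
  ((List.range pairs.length).filter (fun j => decide (j ≠ k) && share pairs j k)).map Int.ofNat

def tgt (pairs : List (Int × Int)) : List (Int × List Int) :=
  (List.range pairs.length).map (fun k => (Int.ofNat k, rowF pairs k))

def keysN (n : Nat) : List Int := (List.range n).map Int.ofNat

lemma share_symm (pairs : List (Int × Int)) (j k : Nat) :
    share pairs j k = share pairs k j := by
  rw [Bool.eq_iff_iff]
  simp only [share, hasQ, Bool.or_eq_true, beq_iff_eq]
  constructor <;> rintro ((h | h) | (h | h)) <;> simp [h, eq_comm]

lemma inter_pair_ne_nil (a b c d : Int) :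
    (PySem.Set.inter (PySem.Set.ofList [a, b]) (PySem.Set.ofList [c, d]) ≠ []) ↔
      (a = c ∨ a = d ∨ b = c ∨ b = d) := by
  constructor
  · intro hne
    obtain ⟨y, hy⟩ := List.exists_mem_of_ne_nil _ hne
    have := (PySem.Set.mem_inter _ _ _).mp hy
    simp only [PySem.Set.mem_ofList, List.mem_cons, List.not_mem_nil, or_false] at this
    rcases this with ⟨h1 | h1, h2 | h2⟩ <;> subst h1 <;> subst h2 <;> tauto
  · intro h hnil
    have hmem : ∃ y, y ∈ PySem.Set.inter (PySem.Set.ofList [a, b]) (PySem.Set.ofList [c, d]) := by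
      rcases h with h | h | h | h
      · exact ⟨a, (PySem.Set.mem_inter _ _ _).mpr (by simp [PySem.Set.mem_ofList, h])⟩
      · exact ⟨a, (PySem.Set.mem_inter _ _ _).mpr (by simp [PySem.Set.mem_ofList, h])⟩
      · exact ⟨b, (PySem.Set.mem_inter _ _ _).mpr (by simp [PySem.Set.mem_ofList, h])⟩
      · exact ⟨b, (PySem.Set.mem_inter _ _ _).mpr (by simp [PySem.Set.mem_ofList, h])⟩
    obtain ⟨y, hy⟩ := hmem
    rw [hnil] at hy
    simp at hy

lemma filter_range_snoc (n a : Nat) (p q : Nat → Bool) (ha : a < n) (hpa : p a = false)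
    (hq : ∀ j, q j = (p j || decide (j = a))) (hlt : ∀ j, p j = true → j < a) :
    (List.range n).filter q = (List.range n).filter p ++ [a] := by
  induction n with
  | zero => omega
  | succ m ih =>
    rw [List.range_succ, List.filter_append, List.filter_append]
    by_cases hma : m = a
    · subst hma
      have h1 : (List.range m).filter q = (List.range m).filter p := by
        apply List.filter_congr
        intro j hj
        have : j < m := List.mem_range.mp hj
        rw [hq j]
        simp [show j ≠ m by omega]
      rw [h1]
      simp [hq m, hpa]
    · have ham : a < m := by omega
      have hpm : p m = false := by
        cases h : p m
        · rfl
        · exact absurd (hlt m h) (by omega)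
      have hqm : q m = false := by rw [hq m, hpm]; simp [hma]
      rw [ih ham]
      simp [hpm, hqm]

lemma mem_mergeEx (a b : List Int) (x y : Int) :
    y ∈ mergeEx a b x ↔ (y ∈ a ∨ y ∈ b) ∧ y ≠ x := by
  fun_induction mergeEx a b x <;> simp_all <;> by_cases hyx : y = x <;> simp_all [eq_comm] <;> tauto

lemma pairwise_mergeEx (a b : List Int) (x : Int) :
    a.Pairwise (· < ·) → b.Pairwise (· < ·) → (mergeEx a b x).Pairwise (· < ·) := by
  fun_induction mergeEx a b x <;> intro ha hb <;>
    simp_all [List.pairwise_cons, mem_mergeEx] <;>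
    intro y hy hyx <;> rcases hy with hy | hy <;>
    first
    | omega
    | exact ha.1 y hy
    | exact hb.1 y hy
    | (rcases hy with rfl | hy
       · omega
       · have := hb.1 y hy; omega)
    | (rcases hy with rfl | hy
       · omega
       · have := ha.1 y hy; omega)

lemma sorted_ext (l1 l2 : List Int) (h1 : l1.Pairwise (· < ·)) (h2 : l2.Pairwise (· < ·))
    (h : ∀ y, y ∈ l1 ↔ y ∈ l2) : l1 = l2 := by
  have n1 : l1.Nodup := h1.imp (fun hab => by omega)
  have n2 : l2.Nodup := h2.imp (fun hab => by omega)
  have hp : l1.Perm l2 := (List.perm_ext_iff_of_nodup n1 n2).mpr h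
  exact hp.eq_of_pairwise (by intro a b _ _ hab hba; omega) h1 h2

lemma bucket_fold (L : List (Int × (Int × Int))) :
    ∀ (d : PySem.Dict Int (List Int)) (q : Int),
      (L.foldl
          (fun d p =>
            let d' := d.insert p.2.1 (d.getD p.2.1 [] ++ [p.1])
            if p.2.2 ≠ p.2.1 then d'.insert p.2.2 (d'.getD p.2.2 [] ++ [p.1]) else d')
          d).getD q []
        = d.getD q [] ++ (L.filter (fun p => (p.2.1 == q) || (p.2.2 == q))).map (·.1) := by
  induction L with
  | nil => intro d q; simp
  | cons p L ih =>
    intro d q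
    simp only [List.foldl_cons, List.filter_cons]
    rw [ih]
    have hstep :
        ((fun (d : PySem.Dict Int (List Int)) (p : Int × Int × Int) =>
            let d' := d.insert p.2.1 (d.getD p.2.1 [] ++ [p.1])
            if p.2.2 ≠ p.2.1 then d'.insert p.2.2 (d'.getD p.2.2 [] ++ [p.1]) else d') d p).getD q []
          = d.getD q [] ++ (if ((p.2.1 == q) || (p.2.2 == q)) then [p.1] else []) := by
      simp only []
      by_cases hvu : p.2.2 = p.2.1
      · rw [if_neg (by simp [hvu])]
        by_cases h1 : q = p.2.1
        · subst h1; simp [hvu]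
        · simp [PySem.Dict.getD_insert, h1, hvu,
            show ¬ p.2.1 = q from fun hh => h1 hh.symm]
      · rw [if_pos hvu]
        by_cases h1 : q = p.2.1
        · subst h1
          simp [PySem.Dict.getD_insert, hvu,
            show ¬ p.2.1 = p.2.2 from fun hh => hvu hh.symm]
        · by_cases h2 : q = p.2.2
          · subst h2
            simp [PySem.Dict.getD_insert, hvu]
          · simp [PySem.Dict.getD_insert, h1, h2,
              show ¬ p.2.1 = q from fun hh => h1 hh.symm,
              show ¬ p.2.2 = q from fun hh => h2 hh.symm]
    rw [hstep]
    split_ifs <;> simp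

lemma condT_iff (pairs : List (Int × Int)) (i t k j : Nat) :
    condT pairs i t k j = true ↔
      j ≠ k ∧ share pairs j k = true ∧ (min j k < i ∨ (min j k = i ∧ max j k < t)) := by
  simp [condT, and_assoc]

lemma mem_rowA (pairs : List (Int × Int)) (i t k : Nat) (y : Int) :
    y ∈ rowA pairs i t k ↔
      ∃ j, j < pairs.length ∧ condT pairs i t k j = true ∧ y = Int.ofNat j := by
  simp only [rowA, List.mem_map, List.mem_filter, List.mem_range]
  constructor
  · rintro ⟨j, ⟨hj, hc⟩, rfl⟩; exact ⟨j, hj, hc, rfl⟩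
  · rintro ⟨j, hj, hc, rfl⟩; exact ⟨j, ⟨hj, hc⟩, rfl⟩

lemma rowA_congr (pairs : List (Int × Int)) {i t i' t' k : Nat}
    (h : ∀ j, j < pairs.length → condT pairs i t k j = condT pairs i' t' k j) :
    rowA pairs i t k = rowA pairs i' t' k := by
  unfold rowA
  congr 1
  exact List.filter_congr (fun j hj => h j (List.mem_range.mp hj))

lemma rowA_snoc_t (pairs : List (Int × Int)) (i t : Nat) (hit : i < t) (htn : t < pairs.length)
    (hsh : share pairs i t = true) :
    rowA pairs i (t + 1) t = rowA pairs i t t ++ [Int.ofNat i] := by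
  unfold rowA
  rw [filter_range_snoc pairs.length i (condT pairs i t t) (condT pairs i (t + 1) t)
      (by omega) ?hpa ?hq ?hlt]
  · simp
  case hpa =>
    cases h : condT pairs i t t i
    · rfl
    · obtain ⟨h1, h2, h3⟩ := (condT_iff pairs i t t i).mp h; omega
  case hq =>
    intro j
    rw [Bool.eq_iff_iff]
    simp only [Bool.or_eq_true, decide_eq_true_eq, condT_iff]
    constructor
    · rintro ⟨h1, h2, h3⟩
      by_cases hji : j = i
      · exact Or.inr hji
      · exact Or.inl ⟨h1, h2, by omega⟩
    · rintro (⟨h1, h2, h3⟩ | rfl)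
      · exact ⟨h1, h2, by omega⟩
      · exact ⟨by omega, hsh, by omega⟩
  case hlt =>
    intro j hj
    obtain ⟨h1, h2, h3⟩ := (condT_iff pairs i t t j).mp hj
    omega

lemma rowA_snoc_i (pairs : List (Int × Int)) (i t : Nat) (hit : i < t) (htn : t < pairs.length)
    (hsh : share pairs t i = true) :
    rowA pairs i (t + 1) i = rowA pairs i t i ++ [Int.ofNat t] := by
  unfold rowA
  rw [filter_range_snoc pairs.length t (condT pairs i t i) (condT pairs i (t + 1) i)
      htn ?hpa ?hq ?hlt]
  · simp
  case hpa =>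
    cases h : condT pairs i t i t
    · rfl
    · obtain ⟨h1, h2, h3⟩ := (condT_iff pairs i t i t).mp h; omega
  case hq =>
    intro j
    rw [Bool.eq_iff_iff]
    simp only [Bool.or_eq_true, decide_eq_true_eq, condT_iff]
    constructor
    · rintro ⟨h1, h2, h3⟩
      by_cases hjt : j = t
      · exact Or.inr hjt
      · exact Or.inl ⟨h1, h2, by omega⟩
    · rintro (⟨h1, h2, h3⟩ | rfl)
      · exact ⟨h1, h2, by omega⟩
      · exact ⟨by omega, hsh, by omega⟩
  case hlt =>
    intro j hj
    obtain ⟨h1, h2, h3⟩ := (condT_iff pairs i t i j).mp hj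
    omega

lemma mem_keysN (n k : Nat) : (Int.ofNat k) ∈ keysN n ↔ k < n := by
  simp only [keysN, List.mem_map, List.mem_range]
  constructor
  · rintro ⟨j, hj, hjk⟩
    have : j = k := Int.ofNat.inj hjk
    omega
  · intro h; exact ⟨k, h, rfl⟩

lemma keys_modify_keysN (n : Nat) (dd : PySem.Dict Int (PySem.Set Int)) (k : Int)
    (d0 : PySem.Set Int) (f : PySem.Set Int → PySem.Set Int)
    (hk : dd.keys = keysN n) (hmem : k ∈ keysN n) :
    (dd.modify k d0 f).keys = keysN n := by
  rw [PySem.Dict.keys_modify,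
    PySem.Dict.keys_insert_of_contains _ _
      ((PySem.Dict.contains_iff_mem_keys _ _).mpr (by rw [hk]; exact hmem)),
    hk]

lemma aStep_inv (pairs : List (Int × Int)) (i t : Nat)
    (hit : i < t) (htn : t < pairs.length)
    (d : PySem.Dict Int (PySem.Set Int))
    (hkeys : d.keys = keysN pairs.length)
    (hrow : ∀ k, k < pairs.length → d.getD (↑k) [] = rowA pairs i t k) :
    (aStep pairs (pget pairs i).1 (pget pairs i).2 (↑i) d (↑t)).keys = keysN pairs.length ∧
      ∀ k, k < pairs.length →
        (aStep pairs (pget pairs i).1 (pget pairs i).2 (↑i) d (↑t)).getD (↑k) [] = rowA pairs i (t + 1) k := by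
  have hin : i < pairs.length := by omega
  have hcond :
      (PySem.Set.inter (PySem.Set.ofList [(pget pairs i).1, (pget pairs i).2])
          (PySem.Set.ofList [(PySem.List.pyGetD pairs (↑t) (0, 0)).1,
            (PySem.List.pyGetD pairs (↑t) (0, 0)).2]) ≠ []) ↔ share pairs t i = true := by
    rw [PySem.List.pyGetD_natCast, inter_pair_ne_nil]
    show _ ↔ share pairs t i = true
    simp only [share, hasQ, pget, Bool.or_eq_true, beq_iff_eq]
    constructor
    · rintro (h | h | h | h)
      · exact Or.inl (Or.inl h.symm)
      · exact Or.inl (Or.inr h.symm)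
      · exact Or.inr (Or.inl h.symm)
      · exact Or.inr (Or.inr h.symm)
    · rintro ((h | h) | (h | h))
      · exact Or.inl h.symm
      · exact Or.inr (Or.inl h.symm)
      · exact Or.inr (Or.inr (Or.inl h.symm))
      · exact Or.inr (Or.inr (Or.inr h.symm))
  unfold aStep
  simp only [show (PySem.Set.empty : PySem.Set Int) = [] from rfl]
  split_ifs with hc
  · -- the two gates share a qubit
    have hsh : share pairs t i = true := hcond.mp hc
    have hsh' : share pairs i t = true := (share_symm pairs t i) ▸ hsh
    constructor
    · exact keys_modify_keysN _ _ _ _ _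
        (keys_modify_keysN _ _ _ _ _ hkeys ((mem_keysN _ i).mpr hin)) ((mem_keysN _ t).mpr htn)
    · intro k hk
      by_cases hkt : (↑k : Int) = ↑t
      · have hkt' : k = t := Int.ofNat.inj hkt
        rw [PySem.Dict.getD_modify, if_pos hkt, PySem.Dict.getD_modify,
          if_neg (show (↑t : Int) ≠ ↑i from fun hh => by have := Int.ofNat.inj hh; omega),
          hrow t htn, hkt',
          show PySem.Set.add (rowA pairs i t t) (↑i) = rowA pairs i t t ++ [Int.ofNat i] from
            PySem.Set.add_of_not_mem (by
              rw [mem_rowA]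
              rintro ⟨j, hj, hcj, hji⟩
              have hji' : i = j := Int.ofNat.inj hji
              obtain ⟨h1, h2, h3⟩ := (condT_iff pairs i t t j).mp hcj
              omega)]
        exact (rowA_snoc_t pairs i t hit htn hsh').symm
      · rw [PySem.Dict.getD_modify, if_neg hkt, PySem.Dict.getD_modify]
        by_cases hki : (↑k : Int) = ↑i
        · have hki' : k = i := Int.ofNat.inj hki
          rw [if_pos hki, hrow i hin, hki',
            show PySem.Set.add (rowA pairs i t i) (↑t) = rowA pairs i t i ++ [Int.ofNat t] from
              PySem.Set.add_of_not_mem (by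
                rw [mem_rowA]
                rintro ⟨j, hj, hcj, hji⟩
                have hji' : t = j := Int.ofNat.inj hji
                obtain ⟨h1, h2, h3⟩ := (condT_iff pairs i t i j).mp hcj
                omega)]
          exact (rowA_snoc_i pairs i t hit htn hsh).symm
        · rw [if_neg hki, hrow k hk]
          apply rowA_congr
          intro j hj
          have hkt2 : k ≠ t := fun hh => hkt (by exact_mod_cast hh)
          have hki2 : k ≠ i := fun hh => hki (by exact_mod_cast hh)
          rw [Bool.eq_iff_iff, condT_iff, condT_iff]
          constructor
          · rintro ⟨h1, h2, h3⟩; exact ⟨h1, h2, by omega⟩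
          · rintro ⟨h1, h2, h3⟩; exact ⟨h1, h2, by omega⟩
  · -- no shared qubit: nothing changes
    have hsh : share pairs t i = false := by
      cases h : share pairs t i
      · rfl
      · exact absurd (hcond.mpr h) hc
    refine ⟨hkeys, fun k hk => ?_⟩
    rw [hrow k hk]
    apply rowA_congr
    intro j hj
    rw [Bool.eq_iff_iff, condT_iff, condT_iff]
    have hnsh : ∀ j' k', j' = t ∧ k' = i ∨ j' = i ∧ k' = t → share pairs j' k' ≠ true := by
      rintro j' k' (⟨rfl, rfl⟩ | ⟨rfl, rfl⟩)
      · simp [hsh]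
      · rw [share_symm]; simp [hsh]
    constructor
    · rintro ⟨h1, h2, h3⟩
      refine ⟨h1, h2, ?_⟩
      rcases h3 with h3 | ⟨h3, h4⟩
      · exact Or.inl h3
      · by_cases hjk : j = t ∧ k = i ∨ j = i ∧ k = t
        · exact absurd h2 (hnsh j k hjk)
        · omega
    · rintro ⟨h1, h2, h3⟩
      refine ⟨h1, h2, ?_⟩
      rcases h3 with h3 | ⟨h3, h4⟩
      · exact Or.inl h3
      · by_cases hjk : j = t ∧ k = i ∨ j = i ∧ k = t
        · exact absurd h2 (hnsh j k hjk)
        · omega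

lemma innerA (pairs : List (Int × Int)) (i : Nat) (hi : i < pairs.length) :
    ∀ (m t : Nat), t = pairs.length - m → i < t → t ≤ pairs.length →
    ∀ (d : PySem.Dict Int (PySem.Set Int)),
      d.keys = keysN pairs.length →
      (∀ k, k < pairs.length → d.getD (↑k) [] = rowA pairs i t k) →
      ((PySem.List.pyRange (↑t) (↑pairs.length) 1).foldl
          (aStep pairs (pget pairs i).1 (pget pairs i).2 (↑i)) d).keys = keysN pairs.length ∧
        ∀ k, k < pairs.length →
          ((PySem.List.pyRange (↑t) (↑pairs.length) 1).foldl
              (aStep pairs (pget pairs i).1 (pget pairs i).2 (↑i)) d).getD (↑k) []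
            = rowA pairs i pairs.length k := by
  intro m
  induction m with
  | zero =>
    intro t ht hit htn d hkeys hrow
    have ht' : t = pairs.length := by omega
    subst ht'
    have hnil : PySem.List.pyRange (↑pairs.length) (↑pairs.length) 1 = [] := by
      rw [List.eq_nil_iff_forall_not_mem]
      intro x hx
      have := (PySem.List.mem_pyRange_one).mp hx
      omega
    rw [hnil]
    exact ⟨hkeys, hrow⟩
  | succ m ih =>
    intro t ht hit htn d hkeys hrow
    have htn' : t < pairs.length := by omega
    rw [PySem.List.pyRange_one_cons (show (↑t : Int) < ↑pairs.length by exact_mod_cast htn'),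
      List.foldl_cons]
    obtain ⟨hk1, hr1⟩ := aStep_inv pairs i t hit htn' d hkeys hrow
    have hcast : (↑t : Int) + 1 = ↑(t + 1) := by push_cast; ring
    rw [hcast]
    exact ih (t + 1) (by omega) (by omega) (by omega) _ hk1 hr1

lemma outerA (pairs : List (Int × Int)) :
    ∀ (xs : List (Int × Int)) (s : Nat) (d : PySem.Dict Int (PySem.Set Int)),
      s + xs.length = pairs.length →
      (∀ m, m < xs.length → xs.getD m (0, 0) = pget pairs (s + m)) →
      d.keys = keysN pairs.length →
      (∀ k, k < pairs.length → d.getD (↑k) [] = rowA pairs s (s + 1) k) →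
      ((PySem.List.enumerate xs (↑s)).foldl
          (fun d p =>
            (PySem.List.pyRange (p.1 + 1) (↑pairs.length) 1).foldl
              (aStep pairs p.2.1 p.2.2 p.1) d) d).keys = keysN pairs.length ∧
        ∀ k, k < pairs.length →
          ((PySem.List.enumerate xs (↑s)).foldl
              (fun d p =>
                (PySem.List.pyRange (p.1 + 1) (↑pairs.length) 1).foldl
                  (aStep pairs p.2.1 p.2.2 p.1) d) d).getD (↑k) []
            = rowA pairs pairs.length (pairs.length + 1) k := by
  intro xs
  induction xs with
  | nil =>
    intro s d hlen hget hkeys hrow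
    have hs : s = pairs.length := by simpa using hlen
    subst hs
    simpa using ⟨hkeys, hrow⟩
  | cons x xs ih =>
    intro s d hlen hget hkeys hrow
    rw [PySem.List.enumerate_cons, List.foldl_cons]
    have hx : x = pget pairs s := by
      have := hget 0 (by simp)
      simpa using this
    have hsn : s < pairs.length := by simp at hlen; omega
    have hs1 : s + 1 ≤ pairs.length := by omega
    obtain ⟨hk1, hr1⟩ :=
      innerA pairs s hsn (pairs.length - (s + 1)) (s + 1) (by omega) (by omega) hs1 d hkeys
        (fun k hk => hrow k hk)
    have hcast : (↑s : Int) + 1 = ↑(s + 1) := by push_cast; ring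
    have hr1' : ∀ k, k < pairs.length →
        ((PySem.List.pyRange (↑(s + 1)) (↑pairs.length) 1).foldl
            (aStep pairs (pget pairs s).1 (pget pairs s).2 (↑s)) d).getD (↑k) []
          = rowA pairs (s + 1) (s + 1 + 1) k := by
      intro k hk
      rw [hr1 k hk]
      apply rowA_congr
      intro j hj
      rw [Bool.eq_iff_iff, condT_iff, condT_iff]
      constructor
      · rintro ⟨h1, h2, h3⟩; exact ⟨h1, h2, by omega⟩
      · rintro ⟨h1, h2, h3⟩; exact ⟨h1, h2, by omega⟩
    have hres := ih (s + 1) _ (by simp at hlen ⊢; omega)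
      (fun m hm => by
        have := hget (m + 1) (by simpa using Nat.succ_lt_succ hm)
        simpa [Nat.add_assoc, Nat.add_comm 1 m] using this)
      (by rw [← hcast] at hk1; exact hk1)
      (fun k hk => by rw [← hcast] at hr1'; exact hr1' k hk)
    rw [hx, hcast]
    exact hres

lemma init_getD_notmem (l : List Int) :
    ∀ (d : PySem.Dict Int (PySem.Set Int)) (q : Int), q ∉ l →
      (l.foldl (fun d i => d.insert i PySem.Set.empty) d).getD q [] = d.getD q [] := by
  induction l with
  | nil => intro d q _; rfl
  | cons a l ih =>
    intro d q hq
    simp only [List.foldl_cons]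
    rw [ih _ q (by simp at hq; tauto), PySem.Dict.getD_insert]
    simp [show ¬ q = a by simp at hq; tauto]

lemma init_getD_mem (l : List Int) :
    ∀ (d : PySem.Dict Int (PySem.Set Int)) (q : Int), q ∈ l →
      (l.foldl (fun d i => d.insert i PySem.Set.empty) d).getD q [] = [] := by
  induction l with
  | nil => intro d q hq; simp at hq
  | cons a l ih =>
    intro d q hq
    simp only [List.foldl_cons]
    by_cases hql : q ∈ l
    · exact ih _ q hql
    · have hqa : q = a := by simp at hq; tauto
      rw [init_getD_notmem l _ q hql, hqa, PySem.Dict.getD_insert]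
      simp

lemma cast_eq_ofNat : (fun (k : Nat) => (↑k : Int)) = Int.ofNat := rfl

lemma nodup_keysN (n : Nat) : (keysN n).Nodup :=
  List.Nodup.map (fun _ _ h => Int.ofNat.inj h) List.nodup_range

lemma rowA_final (pairs : List (Int × Int)) (k : Nat) :
    rowA pairs pairs.length (pairs.length + 1) k = rowF pairs k := by
  unfold rowA rowF
  congr 1
  apply List.filter_congr
  intro j hj
  have hjn : j < pairs.length := List.mem_range.mp hj
  rw [Bool.eq_iff_iff, condT_iff]
  simp only [Bool.and_eq_true, decide_eq_true_eq]
  constructor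
  · rintro ⟨h1, h2, h3⟩; exact ⟨h1, h2⟩
  · rintro ⟨h1, h2⟩; exact ⟨h1, h2, by omega⟩

lemma A_items (pairs : List (Int × Int)) :
    (build_conflict_graph_from_pairs_py pairs).1 = tgt pairs := by
  simp only [build_conflict_graph_from_pairs_py]
  have hpr : PySem.List.pyRange 0 (↑pairs.length) 1 = keysN pairs.length := by
    rw [PySem.List.pyRange_zero_natCast, cast_eq_ofNat]; rfl
  have hkeys0 :
      ((PySem.List.pyRange 0 (↑pairs.length : Int) 1).foldl
          (fun d i => d.insert i (PySem.Set.empty : PySem.Set Int)) PySem.Dict.empty).keys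
        = keysN pairs.length := by
    rw [PySem.Dict.keys_foldl_insert, PySem.Dict.keys_empty, PySem.Set.update_nil_left, hpr,
      PySem.Set.ofList_eq_self_of_nodup _ (nodup_keysN _)]
  have hrow0 : ∀ k, k < pairs.length →
      ((PySem.List.pyRange 0 (↑pairs.length : Int) 1).foldl
          (fun d i => d.insert i (PySem.Set.empty : PySem.Set Int)) PySem.Dict.empty).getD (↑k) []
        = rowA pairs 0 (0 + 1) k := by
    intro k hk
    have hmem : (↑k : Int) ∈ PySem.List.pyRange 0 (↑pairs.length) 1 := by
      rw [hpr]
      exact (mem_keysN _ k).mpr hk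
    rw [init_getD_mem _ _ _ hmem]
    have : rowA pairs 0 1 k = [] := by
      unfold rowA
      rw [List.filter_eq_nil_iff.mpr ?_]
      · rfl
      · intro j hj hc
        obtain ⟨h1, h2, h3⟩ := (condT_iff pairs 0 1 k j).mp hc
        omega
    rw [show (0 + 1 : Nat) = 1 from rfl, this]
  obtain ⟨hkf, hrf⟩ := outerA pairs pairs 0
    ((PySem.List.pyRange 0 (↑pairs.length : Int) 1).foldl
      (fun d i => d.insert i (PySem.Set.empty : PySem.Set Int)) PySem.Dict.empty)
    (by simp) (fun m hm => by simp [pget]) hkeys0 hrow0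
  rw [show ((0 : Nat) : Int) = 0 from rfl] at hkf hrf
  rw [PySem.Dict.items_eq_map_keys _ (by rw [hkf]; exact nodup_keysN _) ([] : PySem.Set Int),
    hkf]
  unfold tgt keysN
  rw [List.map_map]
  apply List.map_congr_left
  intro k hk
  have hkn : k < pairs.length := List.mem_range.mp hk
  have := hrf k hkn
  simp only [Function.comp_apply]
  rw [show ((k : Nat) : Int) = Int.ofNat k from rfl] at this
  rw [this, rowA_final]

def bkt (pairs : List (Int × Int)) (q : Int) : List Int :=
  ((List.range pairs.length).filter (fun j => hasQ pairs j q)).map Int.ofNat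

lemma pairwise_filter_map_range (n : Nat) (p : Nat → Bool) :
    ((((List.range n).filter p)).map Int.ofNat).Pairwise (· < ·) := by
  exact List.Pairwise.map _ (fun a b hab => Int.ofNat_lt.mpr hab)
    (List.Pairwise.filter _ List.pairwise_lt_range)

lemma mem_bkt (pairs : List (Int × Int)) (q y : Int) :
    y ∈ bkt pairs q ↔ ∃ j, j < pairs.length ∧ hasQ pairs j q = true ∧ y = Int.ofNat j := by
  simp only [bkt, List.mem_map, List.mem_filter, List.mem_range]
  constructor
  · rintro ⟨j, ⟨hj, hc⟩, rfl⟩; exact ⟨j, hj, hc, rfl⟩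
  · rintro ⟨j, hj, hc, rfl⟩; exact ⟨j, ⟨hj, hc⟩, rfl⟩

lemma mem_rowF (pairs : List (Int × Int)) (k : Nat) (y : Int) :
    y ∈ rowF pairs k ↔
      ∃ j, j < pairs.length ∧ j ≠ k ∧ share pairs j k = true ∧ y = Int.ofNat j := by
  simp only [rowF, List.mem_map, List.mem_filter, List.mem_range, Bool.and_eq_true,
    decide_eq_true_eq]
  constructor
  · rintro ⟨j, ⟨hj, hc1, hc2⟩, rfl⟩; exact ⟨j, hj, hc1, hc2, rfl⟩
  · rintro ⟨j, hj, hc1, hc2, rfl⟩; exact ⟨j, ⟨hj, hc1, hc2⟩, rfl⟩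

lemma B_row (pairs : List (Int × Int)) (k : Nat) :
    PySem.Set.ofList
        (mergeEx (bkt pairs (pget pairs k).1)
          (if (pget pairs k).2 ≠ (pget pairs k).1 then bkt pairs (pget pairs k).2 else [])
          (Int.ofNat k))
      = rowF pairs k := by
  have hb : (if (pget pairs k).2 ≠ (pget pairs k).1 then bkt pairs (pget pairs k).2
      else ([] : List Int)).Pairwise (· < ·) := by
    split_ifs
    · exact pairwise_filter_map_range _ _
    · exact List.Pairwise.nil
  have hma : (bkt pairs (pget pairs k).1).Pairwise (· < ·) :=
    pairwise_filter_map_range pairs.length _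
  have hrp : (rowF pairs k).Pairwise (· < ·) := pairwise_filter_map_range pairs.length _
  have hm := pairwise_mergeEx _ _ (Int.ofNat k) hma hb
  rw [PySem.Set.ofList_eq_self_of_nodup _ (hm.imp (fun hab => by omega))]
  apply sorted_ext _ _ hm hrp
  intro y
  rw [mem_mergeEx, mem_rowF]
  by_cases hvu : (pget pairs k).2 = (pget pairs k).1
  · rw [if_neg (by simp [hvu])]
    simp only [List.not_mem_nil, or_false, mem_bkt]
    constructor
    · rintro ⟨⟨j, hj, hq, rfl⟩, hy⟩
      refine ⟨j, hj, ?_, ?_, rfl⟩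
      · intro hjk; exact hy (by rw [hjk])
      · simp only [share, Bool.or_eq_true]
        exact Or.inl hq
    · rintro ⟨j, hj, hjk, hsh, rfl⟩
      simp only [share, Bool.or_eq_true, hvu] at hsh
      refine ⟨⟨j, hj, ?_, rfl⟩, ?_⟩
      · tauto
      · intro hh; exact hjk (Int.ofNat.inj hh)
  · rw [if_pos hvu]
    simp only [mem_bkt]
    constructor
    · rintro ⟨⟨j, hj, hq, rfl⟩ | ⟨j, hj, hq, rfl⟩, hy⟩ <;>
        · refine ⟨j, hj, ?_, ?_, rfl⟩
          · intro hjk; exact hy (by rw [hjk])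
          · simp only [share, Bool.or_eq_true]; tauto
    · rintro ⟨j, hj, hjk, hsh, rfl⟩
      simp only [share, Bool.or_eq_true] at hsh
      constructor
      · rcases hsh with hq | hq
        · exact Or.inl ⟨j, hj, hq, rfl⟩
        · exact Or.inr ⟨j, hj, hq, rfl⟩
      · intro hh; exact hjk (Int.ofNat.inj hh)

lemma henum (pairs : List (Int × Int)) :
    PySem.List.enumerate pairs
      = (List.range pairs.length).map (fun j => (Int.ofNat j, pget pairs j)) := by
  rw [PySem.List.enumerate_eq_map_pyRange pairs (0, 0)]
  have : PySem.List.len pairs = (↑pairs.length : Int) := by simp [PySem.List.len]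
  rw [this, PySem.List.pyRange_zero_natCast, List.map_map]
  apply List.map_congr_left
  intro j _
  simp only [Function.comp_apply, PySem.List.pyGetD_natCast]
  rfl

lemma B_items (pairs : List (Int × Int)) :
    (build_conflict_graph_from_pairs_py_alt pairs).1 = tgt pairs := by
  simp only [build_conflict_graph_from_pairs_py_alt]
  have hfresh : ∀ a ∈ PySem.List.enumerate pairs,
      (PySem.Dict.empty : PySem.Dict Int (PySem.Set Int)).contains
        ((fun (p : Int × Int × Int) => p.1) a) = false := by
    intro a _
    simp [PySem.Dict.contains_empty]
  have hnodup : ((PySem.List.enumerate pairs).map (fun (p : Int × Int × Int) => p.1)).Nodup := by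
    rw [henum, List.map_map]
    exact List.Nodup.map (fun a b h => by
      simpa using congrArg id h : Function.Injective ((fun (p : Int × Int × Int) => p.1) ∘
        (fun j => (Int.ofNat j, pget pairs j)))) List.nodup_range
  have hbkt : ∀ q,
      ((PySem.List.enumerate pairs).foldl
          (fun d p =>
            let d' := d.insert p.2.1 (d.getD p.2.1 [] ++ [p.1])
            if p.2.2 ≠ p.2.1 then d'.insert p.2.2 (d'.getD p.2.2 [] ++ [p.1]) else d')
          PySem.Dict.empty).getD q []
        = bkt pairs q := by
    intro q
    rw [bucket_fold, PySem.Dict.getD_empty, List.nil_append, henum, List.filter_map,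
      List.map_map]
    rfl
  rw [PySem.Dict.items_foldl_insert_fresh _ _ _ _ hfresh hnodup]
  rw [show (PySem.Dict.empty : PySem.Dict Int (PySem.Set Int)).items = [] from rfl,
    List.nil_append]
  simp only [hbkt]
  rw [henum, List.map_map]
  unfold tgt
  apply List.map_congr_left
  intro k hkmem
  have hkn : k < pairs.length := List.mem_range.mp hkmem
  simp only [Function.comp_apply]

  exact congrArg (fun r => (Int.ofNat k, r)) (B_row pairs k)

-- ===== VERDICT (by name: the statement is the Claim_ definition above) =====
theorem build_conflict_graph_from_pairs_py_spec : Claim_equal_build_conflict_graph_from_pairs_py := by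
  intro pairs _
  unfold Spec_build_conflict_graph_from_pairs_py
  have hA := A_items pairs
  have hB := B_items pairs
  apply Prod.ext
  · rw [hA, hB]
  · rfl
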